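-- pv_equiv track=rewrite | github.com/oneishaansharma/interviewPractice | Recursion/countAbc.py | countAbc
-- ===== SOURCE A (Python) =====
-- def countAbc(string):
-- 	if len(string) < 3:
-- 		return 0
-- 	else:
-- 		if(string[0:3]=="abc" or string[0:3] == "aba"):
--
-- 			# to count 'ababa' as 2 check again on the 3rd letter
-- 			# return 1 + countAbc(string[2:])
--
-- 			return 1 + countAbc(string[3:])
-- 		else:
-- 			return countAbc(string[1:])
-- ===== SOURCE B (Python) =====
-- def countAbc(string):
--     n = len(string)
--     i = 0
--     count = 0
--     while i + 3 <= n: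
--         tri = string[i:i+3]
--         if tri == "abc" or tri == "aba":
--             count += 1
--             i += 3
--         else:
--             i += 1
--     return count
-- ===== Notes on version B (the rewrite author's own statement) =====
-- stated objective: faster
-- what changed: Replaces A's recursion that rebuilds a slice of the string at every step with a single index-based while loop (advance 3 on a match, else 1) keeping a running count.
import Mathlib
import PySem

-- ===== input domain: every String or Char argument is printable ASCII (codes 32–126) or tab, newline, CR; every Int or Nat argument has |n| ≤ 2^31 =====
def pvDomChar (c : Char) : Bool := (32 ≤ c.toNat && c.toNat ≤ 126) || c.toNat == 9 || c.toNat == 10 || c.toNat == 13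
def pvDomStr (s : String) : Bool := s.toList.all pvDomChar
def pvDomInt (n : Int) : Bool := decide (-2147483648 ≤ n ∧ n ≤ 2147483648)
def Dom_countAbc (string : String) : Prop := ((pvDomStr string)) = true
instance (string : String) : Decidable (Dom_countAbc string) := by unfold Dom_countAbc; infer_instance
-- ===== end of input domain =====

-- B replaces A's slice-rebuilding recursion with a single linear index scan (advance 3 on match, else 1): faster.

-- ===== PORT A =====
-- A recurses on string[3:] / string[1:], comparing string[0:3] against "abc"/"aba".
def countAbcAux : List Char → Int
  | l =>
    if l.length < 3 then 0
    else
      if PySem.List.slice l (some 0) (some 3) = "abc".toList ∨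
         PySem.List.slice l (some 0) (some 3) = "aba".toList then
        1 + countAbcAux (PySem.List.slice l (some 3) none)
      else
        countAbcAux (PySem.List.slice l (some 1) none)
  termination_by l => l.length
  decreasing_by
    · show (PySem.List.slice l (some 3) none).length < l.length
      simp [PySem.List.slice, PySem.List.clampIdx]; omega
    · show (PySem.List.slice l (some 1) none).length < l.length
      simp [PySem.List.slice, PySem.List.clampIdx]; omega

def countAbc (string : String) : Int := countAbcAux string.toList

-- ===== PORT B =====
-- Source B's while loop: the remaining suffix plays the role of index i, count is the accumulator;
-- advance 3 on a match of the three chars at the front, else 1.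
def countAbcAltLoop : List Char → Int → Int
  | a :: b :: c :: rest, count =>
    if [a, b, c] = "abc".toList ∨ [a, b, c] = "aba".toList then
      countAbcAltLoop rest (count + 1)
    else
      countAbcAltLoop (b :: c :: rest) count
  | _, count => count

def countAbc_alt (string : String) : Int := countAbcAltLoop string.toList 0

-- ===== PRECONDITION & SPEC =====
def Spec_countAbc (string : String) (out : Int) : Prop := out = countAbc_alt string
instance (string : String) (out : Int) : Decidable (Spec_countAbc string out) := by unfold Spec_countAbc; infer_instance

-- ===== CLAIM (what is proved, stated in full; the proofs are below) =====
def Claim_equal_countAbc : Prop := ∀ (string : String), Dom_countAbc string → Spec_countAbc string (countAbc string)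

-- ===== LEMMAS AND PROOFS =====

theorem pv_slice03 (a b c : Char) (rest : List Char) :
    PySem.List.slice (a::b::c::rest) (some 0) (some 3) = [a, b, c] := by
  simp [PySem.List.slice, PySem.List.clampIdx]

theorem pv_slice3 (a b c : Char) (rest : List Char) :
    PySem.List.slice (a::b::c::rest) (some 3) none = rest := by
  simp [PySem.List.slice, PySem.List.clampIdx]

theorem pv_slice1 (a b c : Char) (rest : List Char) :
    PySem.List.slice (a::b::c::rest) (some 1) none = b::c::rest := by
  simp [PySem.List.slice, PySem.List.clampIdx]

theorem countAbcAltLoop_eq (l : List Char) (count : Int) :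
    countAbcAltLoop l count = count + countAbcAux l := by
  induction l, count using countAbcAltLoop.induct with
  | case1 a b c rest count h ih =>
    rw [countAbcAltLoop, countAbcAux, pv_slice03, pv_slice3]
    rw [if_neg (show ¬(a::b::c::rest).length < 3 by simp)]
    rw [ih]
    split_ifs
    ring
  | case2 a b c rest count h ih =>
    rw [countAbcAltLoop, countAbcAux, pv_slice03, pv_slice1]
    rw [if_neg (show ¬(a::b::c::rest).length < 3 by simp)]
    rw [ih]
    split_ifs
    rfl
  | case3 l count h =>
    rw [countAbcAltLoop.eq_def, countAbcAux]
    have hlen : l.length < 3 := by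
      match l, h with
      | [], _ => simp
      | [a], _ => simp
      | [a, b], _ => simp
      | a :: b :: c :: rest, h => exact absurd rfl (h a b c rest)
    rw [if_pos hlen]
    match l with
    | [] => simp
    | [a] => simp
    | [a, b] => simp

-- ===== VERDICT (by name: the statement is the Claim_ definition above) =====
theorem countAbc_spec : Claim_equal_countAbc := by
  intro s _
  unfold Spec_countAbc countAbc countAbc_alt
  rw [countAbcAltLoop_eq]
  ring
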